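-- pv_equiv track=rewrite | github.com/Fondamenti18/fondamenti-di-programmazione | students/1811290/homework04/program01.py | cancella_sottoalbero02
-- ===== SOURCE A (Python) =====
-- def cancella_sottoalbero02(dict_old,x,lista_livelli,dizionario_nuovo):
--     dizionario_nuovo1=dizionario_nuovo
--     lista_livelli01=[]
--     k=0
--     for valore_della_lista in lista_livelli:
--         if dict_old[valore_della_lista]==[]:
--             dizionario_nuovo[valore_della_lista]=dict_old[valore_della_lista]
--         else:
--             dizionario_nuovo[valore_della_lista]=dict_old[valore_della_lista]
--             for y in dict_old[valore_della_lista]: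
--                 lista_livelli01+=[y]
--         k+=1
--     lista_livelli=lista_livelli01
--     if lista_livelli==[]:
--         return dizionario_nuovo
--     return cancella_sottoalbero02(dict_old,x,lista_livelli,dizionario_nuovo)
-- ===== SOURCE B (Python) =====
-- def cancella_sottoalbero02(dict_old, x, lista_livelli, dizionario_nuovo):
--     # Iterative node-by-node BFS over a growing work list (no recursion, no
--     # per-level batching); mutates dizionario_nuovo in place exactly like A.
--     coda = list(lista_livelli)
--     i = 0
--     while i < len(coda):
--         nodo = coda[i]
--         figli = dict_old[nodo]
--         dizionario_nuovo[nodo] = figli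
--         coda += figli
--         i += 1
--     return dizionario_nuovo
-- ===== Notes on version B (the rewrite author's own statement) =====
-- stated objective: simpler
-- what changed: A's level-synchronous tail recursion (build the whole next level, recurse on it) is replaced by a single iterative node-by-node BFS work list: one while-loop with an index into a growing queue, no recursion and no per-level batching.
import Mathlib
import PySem

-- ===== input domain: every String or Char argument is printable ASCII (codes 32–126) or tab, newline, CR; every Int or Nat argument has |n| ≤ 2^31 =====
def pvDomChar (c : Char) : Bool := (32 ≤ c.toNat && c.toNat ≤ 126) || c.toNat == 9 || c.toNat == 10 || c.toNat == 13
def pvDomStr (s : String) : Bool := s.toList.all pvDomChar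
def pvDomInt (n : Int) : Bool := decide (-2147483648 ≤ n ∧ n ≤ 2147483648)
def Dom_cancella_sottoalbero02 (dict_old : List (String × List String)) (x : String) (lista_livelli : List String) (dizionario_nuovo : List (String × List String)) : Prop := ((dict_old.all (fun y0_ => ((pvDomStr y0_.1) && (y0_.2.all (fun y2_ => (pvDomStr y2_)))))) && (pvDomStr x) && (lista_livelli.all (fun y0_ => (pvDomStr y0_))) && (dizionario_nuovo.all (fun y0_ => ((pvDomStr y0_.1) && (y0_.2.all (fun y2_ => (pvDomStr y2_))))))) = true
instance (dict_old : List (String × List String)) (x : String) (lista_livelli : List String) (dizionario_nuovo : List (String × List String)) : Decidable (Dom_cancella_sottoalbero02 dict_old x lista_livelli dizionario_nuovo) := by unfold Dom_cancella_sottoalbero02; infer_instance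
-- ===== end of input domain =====

-- B replaces A's level-batched recursion by a single iterative node-by-node work-list loop
-- (simpler); both mutate dizionario_nuovo identically in Python, the equivalence proved here
-- is about the returned dict's value.

-- ===== PORT A =====
-- one call of A's for-loop over the current level: copies each node's children into the new
-- dict and collects the next level (lista_livelli01); none = KeyError in dict_old[v]
def pvALevel (da : PySem.Dict String (List String)) :
    List String → PySem.Dict String (List String) → List String →
    Option (PySem.Dict String (List String) × List String)
  | [], dn, acc => some (dn, acc)
  | v :: rest, dn, acc =>
    match da.get? v with
    | none => none
    | some figli =>
      if figli = [] then pvALevel da rest (dn.insert v figli) acc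
      else pvALevel da rest (dn.insert v figli) (acc ++ figli)

-- A's tail recursion on levels; the fuel is only a totality guard (Python has none): under
-- Pre_ the rank of every reachable node strictly increases level by level, so
-- dict_old.length + 1 levels always suffice and the fuel is never exhausted
def pvARec (da : PySem.Dict String (List String)) :
    Nat → List String → PySem.Dict String (List String) →
    Option (PySem.Dict String (List String))
  | 0, _, _ => none
  | fuel+1, lvls, dn =>
    match pvALevel da lvls dn [] with
    | none => none
    | some (dn', next) => if next = [] then some dn' else pvARec da fuel next dn'

def cancella_sottoalbero02 (dict_old : List (String × List String)) (x : String) (lista_livelli : List String) (dizionario_nuovo : List (String × List String)) : List (String × List String) :=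
  ((pvARec (PySem.Dict.ofList dict_old) (dict_old.length + 1) lista_livelli
      (PySem.Dict.ofList dizionario_nuovo)).getD (PySem.Dict.ofList dizionario_nuovo)).items

-- ===== PORT B =====
-- B's while loop: coda[i:] is the remaining work list; none = KeyError. The fuel is only a
-- totality guard (the Python loop has none): under Pre_ it is a proved upper bound on the
-- number of processed nodes
def pvBLoop (da : PySem.Dict String (List String)) :
    Nat → List String → PySem.Dict String (List String) →
    Option (PySem.Dict String (List String))
  | _, [], dn => some dn
  | 0, _ :: _, _ => none
  | fuel+1, nodo :: rest, dn =>
    match da.get? nodo with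
    | none => none
    | some figli => pvBLoop da fuel (rest ++ figli) (dn.insert nodo figli)

def cancella_sottoalbero02_alt (dict_old : List (String × List String)) (x : String) (lista_livelli : List String) (dizionario_nuovo : List (String × List String)) : List (String × List String) :=
  ((pvBLoop (PySem.Dict.ofList dict_old)
      ((lista_livelli.length + 1) * (dict_old.length + 1) *
        ((dict_old.map (fun p => p.2.length)).foldl max 0 + 1) ^ (dict_old.length + 1))
      lista_livelli (PySem.Dict.ofList dizionario_nuovo)).getD
      (PySem.Dict.ofList dizionario_nuovo)).items

-- ===== PRECONDITION & SPEC =====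
-- bounded-fixpoint reachability closure over dict_old's child edges (da.getD v [] = the
-- children of v, [] when v is no key); pvK steps always reach the fixpoint
def pvStepS (da : PySem.Dict String (List String)) (S : List String) : List String :=
  PySem.Set.update S (S.flatMap (fun v => da.getD v []))

def pvClosN (da : PySem.Dict String (List String)) : Nat → List String → List String
  | 0, S => S
  | n+1, S => pvClosN da n (pvStepS da S)

def pvAC (dict_old : List (String × List String)) : List String :=
  dict_old.flatMap (fun p => p.2)

def pvK (dict_old : List (String × List String)) (ll : List String) : Nat :=
  ll.length + (pvAC dict_old).length + 1

-- the set of nodes A's recursion ever touches: everything reachable from lista_livelli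
def pvReach (dict_old : List (String × List String)) (ll : List String) : List String :=
  pvClosN (PySem.Dict.ofList dict_old) (pvK dict_old ll) (PySem.Set.ofList ll)

-- Pre_ holds exactly when A returns: every node reachable from lista_livelli is a key of
-- dict_old (otherwise A raises KeyError) and no reachable node lies on a cycle (otherwise
-- A recurses forever); Python's recursion limit on extremely deep trees is not modelled.
def Pre_cancella_sottoalbero02 (dict_old : List (String × List String)) (x : String) (lista_livelli : List String) (dizionario_nuovo : List (String × List String)) : Prop :=
  (∀ v ∈ pvReach dict_old lista_livelli, v ∈ dict_old.map Prod.fst) ∧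
  (∀ v ∈ pvReach dict_old lista_livelli,
    v ∉ pvClosN (PySem.Dict.ofList dict_old) (pvK dict_old lista_livelli)
          (PySem.Set.ofList ((PySem.Dict.ofList dict_old).getD v [])))
instance (dict_old : List (String × List String)) (x : String) (lista_livelli : List String) (dizionario_nuovo : List (String × List String)) : Decidable (Pre_cancella_sottoalbero02 dict_old x lista_livelli dizionario_nuovo) := by unfold Pre_cancella_sottoalbero02; infer_instance

def pvWitness_cancella_sottoalbero02 : (List (String × List String)) × String × List String × (List (String × List String)) :=
  ([("a", ["b"]), ("b", [])], "x", ["a"], [])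

def Spec_cancella_sottoalbero02 (dict_old : List (String × List String)) (x : String) (lista_livelli : List String) (dizionario_nuovo : List (String × List String)) (out : List (String × List String)) : Prop := out = cancella_sottoalbero02_alt dict_old x lista_livelli dizionario_nuovo
instance (dict_old : List (String × List String)) (x : String) (lista_livelli : List String) (dizionario_nuovo : List (String × List String)) (out : List (String × List String)) : Decidable (Spec_cancella_sottoalbero02 dict_old x lista_livelli dizionario_nuovo out) := by unfold Spec_cancella_sottoalbero02; infer_instance

-- ===== CLAIM (what is proved, stated in full; the proofs are below) =====
def Claim_equal_cancella_sottoalbero02 : Prop := ∀ (dict_old : List (String × List String)) (x : String) (lista_livelli : List String) (dizionario_nuovo : List (String × List String)), Dom_cancella_sottoalbero02 dict_old x lista_livelli dizionario_nuovo → Pre_cancella_sottoalbero02 dict_old x lista_livelli dizionario_nuovo → Spec_cancella_sottoalbero02 dict_old x lista_livelli dizionario_nuovo (cancella_sottoalbero02 dict_old x lista_livelli dizionario_nuovo)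

-- ===== LEMMAS AND PROOFS =====

-- a closed node set: contains the children of all its members
def pvClosed (da : PySem.Dict String (List String)) (S : List String) : Prop :=
  ∀ v ∈ S, ∀ c ∈ da.getD v [], c ∈ S

theorem pvMem_step (da : PySem.Dict String (List String)) (S : List String) (y : String) :
    y ∈ pvStepS da S ↔ y ∈ S ∨ ∃ v ∈ S, y ∈ da.getD v [] := by
  simp [pvStepS, PySem.Set.mem_update, List.mem_flatMap]

theorem pvSub_step (da : PySem.Dict String (List String)) (S : List String) :
    S ⊆ pvStepS da S := fun _ h => (pvMem_step da S _).mpr (Or.inl h)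

theorem pvNodup_step (da : PySem.Dict String (List String)) (S : List String)
    (h : S.Nodup) : (pvStepS da S).Nodup := PySem.Set.nodup_update S _ h

theorem pvStep_of_closed (da : PySem.Dict String (List String)) (S : List String)
    (h : pvClosed da S) : pvStepS da S = S := by
  rw [pvStepS, PySem.Set.update_eq_append_filter]
  have : (PySem.Set.ofList (S.flatMap fun v => da.getD v [])).filter
      (fun y => !(PySem.Set.contains S y)) = [] := by
    rw [List.filter_eq_nil_iff]
    intro y hy
    obtain ⟨v, hv, hc⟩ := List.mem_flatMap.mp ((PySem.Set.mem_ofList _ _).mp hy)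
    simpa using h v hv y hc
  rw [this, List.append_nil]

theorem pvStep_len (da : PySem.Dict String (List String)) (S : List String)
    (h : ¬ pvClosed da S) : S.length + 1 ≤ (pvStepS da S).length := by
  rw [pvStepS, PySem.Set.update_eq_append_filter, List.length_append]
  have : (PySem.Set.ofList (S.flatMap fun v => da.getD v [])).filter
      (fun y => !(PySem.Set.contains S y)) ≠ [] := by
    intro hnil
    apply h
    intro v hv c hc
    by_contra hcS
    have hmem : c ∈ (PySem.Set.ofList (S.flatMap fun v => da.getD v [])).filter
        (fun y => !(PySem.Set.contains S y)) := by
      rw [List.mem_filter]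
      refine ⟨(PySem.Set.mem_ofList _ _).mpr (List.mem_flatMap.mpr ⟨v, hv, hc⟩), ?_⟩
      simp only [Bool.not_eq_eq_eq_not, Bool.not_true]
      exact Bool.eq_false_iff.mpr (fun hct => hcS ((PySem.Set.contains_iff _ _).mp hct))
    rw [hnil] at hmem
    exact absurd hmem (List.not_mem_nil)
  have := List.length_pos_iff.mpr this
  omega

theorem pvClosN_sub (da : PySem.Dict String (List String)) :
    ∀ (n : Nat) (S : List String), S ⊆ pvClosN da n S := by
  intro n
  induction n with
  | zero => intro S; exact fun _ h => h
  | succ n ih => intro S; exact fun y hy => ih (pvStepS da S) (pvSub_step da S hy)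

theorem pvClosN_nodup (da : PySem.Dict String (List String)) :
    ∀ (n : Nat) (S : List String), S.Nodup → (pvClosN da n S).Nodup := by
  intro n
  induction n with
  | zero => intro S h; exact h
  | succ n ih => intro S h; exact ih _ (pvNodup_step da S h)

theorem pvClosN_sub_closed (da : PySem.Dict String (List String)) (T : List String)
    (hT : pvClosed da T) :
    ∀ (n : Nat) (S : List String), S ⊆ T → pvClosN da n S ⊆ T := by
  intro n
  induction n with
  | zero => intro S h; exact h
  | succ n ih =>
    intro S h
    apply ih
    intro y hy
    rcases (pvMem_step da S y).mp hy with h1 | ⟨v, hv, hc⟩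
    · exact h h1
    · exact hT v (h hv) y hc

theorem pvClosN_closed (da : PySem.Dict String (List String)) (W : List String)
    (hW : ∀ v, ∀ c ∈ da.getD v [], c ∈ W) :
    ∀ (n : Nat) (S : List String), S.Nodup → S ⊆ W →
      (PySem.Set.ofList W).length < n + S.length → pvClosed da (pvClosN da n S) := by
  intro n
  induction n with
  | zero =>
    intro S hnd hsub hlen
    exfalso
    have hsub' : S ⊆ PySem.Set.ofList W := fun y hy =>
      (PySem.Set.mem_ofList _ _).mpr (hsub hy)
    have := (hnd.subperm hsub').length_le
    omega
  | succ n ih =>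
    intro S hnd hsub hlen
    by_cases hc : pvClosed da S
    · have hfix : pvClosN da (n+1) S = S := by
        have : ∀ m, pvClosN da m S = S := by
          intro m
          induction m with
          | zero => rfl
          | succ m ihm => rw [pvClosN, pvStep_of_closed da S hc, ihm]
        exact this (n+1)
      rw [hfix]; exact hc
    · have hlen' := pvStep_len da S hc
      have hsub' : pvStepS da S ⊆ W := by
        intro y hy
        rcases (pvMem_step da S y).mp hy with h1 | ⟨v, _, hcv⟩
        · exact hsub h1
        · exact hW v y hcv
      exact ih (pvStepS da S) (pvNodup_step da S hnd) hsub' (by omega)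

-- every value reachable by lookup in a foldl-insert dict is a value of the list or of the seed
theorem pvGet?_foldl_mem (l : List (String × List String))
    (d : PySem.Dict String (List String)) (k : String) (w : List String)
    (h : (l.foldl (fun acc p => acc.insert p.1 p.2) d).get? k = some w) :
    w ∈ l.map Prod.snd ∨ d.get? k = some w := by
  induction l generalizing d with
  | nil => exact Or.inr h
  | cons p rest ih =>
    rcases ih (d.insert p.1 p.2) (by simpa using h) with h1 | h1
    · exact Or.inl (by simp [h1])
    · rw [PySem.Dict.get?_insert] at h1
      by_cases hk : k = p.1
      · simp [hk] at h1; exact Or.inl (by simp [← h1])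
      · simp [hk] at h1; exact Or.inr h1

-- all children in dict_old lie in the concatenation of its value lists
theorem pvChilds_sub_AC (dict_old : List (String × List String)) (v c : String)
    (hc : c ∈ (PySem.Dict.ofList dict_old).getD v []) : c ∈ pvAC dict_old := by
  unfold PySem.Dict.getD at hc
  cases hg : (PySem.Dict.ofList dict_old).get? v with
  | none => rw [hg] at hc; simp at hc
  | some w =>
    rw [hg] at hc
    rcases pvGet?_foldl_mem dict_old PySem.Dict.empty v w hg with hw | hw
    · obtain ⟨p, hp, rfl⟩ := List.mem_map.mp hw
      exact List.mem_flatMap.mpr ⟨p, hp, hc⟩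
    · simp [PySem.Dict.get?_empty] at hw

theorem pvOk_iff (l : List (String × List String)) (v : String) :
    ((PySem.Dict.ofList l).get? v).isSome = true ↔ v ∈ l.map Prod.fst := by
  have hk : (PySem.Dict.ofList l).keys = PySem.Set.update (PySem.Dict.empty.keys (ν := List String)) (l.map Prod.fst) := by
    simpa using PySem.Dict.keys_foldl_insert_key l Prod.fst (fun _ p => p.2) PySem.Dict.empty
  rw [Option.isSome_iff_ne_none, ne_eq, PySem.Dict.get?_eq_none_iff_not_mem_keys, hk,
    PySem.Dict.keys_empty]
  simp [PySem.Set.mem_update]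

-- next BFS level / the children appended to B's work list
def pvNxt (da : PySem.Dict String (List String)) (L : List String) : List String :=
  L.flatMap (fun v => da.getD v [])

-- the inserts both programs perform while processing the nodes of L in order
def pvIns (da : PySem.Dict String (List String)) (dn : PySem.Dict String (List String)) (L : List String) : PySem.Dict String (List String) :=
  L.foldl (fun d v => d.insert v (da.getD v [])) dn

-- exact fuel B needs: nodes of the current level plus fuel for the following m levels
def pvG (da : PySem.Dict String (List String)) : Nat → List String → Nat
  | 0, L => L.length
  | m+1, L => L.length + pvG da m (pvNxt da L)

theorem pvALevel_eq (da : PySem.Dict String (List String)) (L : List String)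
    (dn : PySem.Dict String (List String)) (acc : List String)
    (h : ∀ v ∈ L, (da.get? v).isSome = true) :
    pvALevel da L dn acc = some (pvIns da dn L, acc ++ pvNxt da L) := by
  induction L generalizing dn acc with
  | nil => simp [pvALevel, pvIns, pvNxt]
  | cons v rest ih =>
    obtain ⟨figli, hfig⟩ := Option.isSome_iff_exists.mp (h v (by simp))
    have hgetD : da.getD v [] = figli := by simp [PySem.Dict.getD, hfig]
    have hrest : ∀ u ∈ rest, (da.get? u).isSome = true := fun u hu => h u (by simp [hu])
    by_cases hf : figli = [] <;>
      simp [pvALevel, hfig, hf, ih _ _ hrest, pvIns, pvNxt, hgetD, List.flatMap_cons]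

theorem pvBLoop_nil (da : PySem.Dict String (List String)) (f : Nat)
    (dn : PySem.Dict String (List String)) : pvBLoop da f [] dn = some dn := by
  cases f <;> rfl

theorem pvBLoop_split (da : PySem.Dict String (List String)) (L1 L2 : List String)
    (dn : PySem.Dict String (List String)) (f : Nat)
    (h : ∀ v ∈ L1, (da.get? v).isSome = true) (hf : L1.length ≤ f) :
    pvBLoop da f (L1 ++ L2) dn = pvBLoop da (f - L1.length) (L2 ++ pvNxt da L1) (pvIns da dn L1) := by
  induction L1 generalizing L2 dn f with
  | nil => simp [pvNxt, pvIns]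
  | cons v rest ih =>
    cases f with
    | zero => simp at hf
    | succ f' =>
      obtain ⟨figli, hfig⟩ := Option.isSome_iff_exists.mp (h v (by simp))
      have hgetD : da.getD v [] = figli := by simp [PySem.Dict.getD, hfig]
      have hrest : ∀ u ∈ rest, (da.get? u).isSome = true := fun u hu => h u (by simp [hu])
      have hlen : rest.length ≤ f' := by simpa using hf
      calc pvBLoop da (f' + 1) (v :: rest ++ L2) dn
          = pvBLoop da f' (rest ++ (L2 ++ figli)) (dn.insert v figli) := by
            simp [pvBLoop, hfig]
        _ = pvBLoop da (f' - rest.length) ((L2 ++ figli) ++ pvNxt da rest)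
              (pvIns da (dn.insert v figli) rest) := ih _ _ _ hrest hlen
        _ = pvBLoop da (f' + 1 - (v :: rest).length) (L2 ++ pvNxt da (v :: rest))
              (pvIns da dn (v :: rest)) := by
            simp [pvNxt, pvIns, hgetD, List.flatMap_cons, List.append_assoc]

theorem pvBLoop_mono (da : PySem.Dict String (List String)) (f k : Nat) :
    ∀ (todo : List String) (dn r : PySem.Dict String (List String)),
    pvBLoop da f todo dn = some r → pvBLoop da (f + k) todo dn = some r := by
  induction f with
  | zero =>
    intro todo dn r h
    cases todo with
    | nil => simpa [pvBLoop_nil] using h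
    | cons a l => simp [pvBLoop] at h
  | succ f' ih =>
    intro todo dn r h
    cases todo with
    | nil => simpa [pvBLoop_nil] using h
    | cons nodo rest =>
      cases hfig : da.get? nodo with
      | none => simp [pvBLoop, hfig] at h
      | some figli =>
        have : f' + 1 + k = (f' + k) + 1 := by omega
        rw [this]
        simp only [pvBLoop, hfig] at h ⊢
        exact ih _ _ _ h

-- the central lemma: with a rank strictly increasing along reachable edges, A's
-- level-by-level recursion and B's work-list loop compute the same dict
theorem pvMain (da : PySem.Dict String (List String)) (C : List String)
    (rank : String → Nat) (N : Nat)
    (HC : ∀ v ∈ C, (da.get? v).isSome = true ∧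
      ∀ c ∈ da.getD v [], c ∈ C ∧ rank v < rank c)
    (Hbnd : ∀ v ∈ C, rank v < N) :
    ∀ (m : Nat) (L : List String) (dn : PySem.Dict String (List String)),
    (∀ v ∈ L, v ∈ C) →
    (∀ v ∈ L, N ≤ m + rank v) →
    ∃ r, pvARec da (m + 1) L dn = some r ∧ pvBLoop da (pvG da m L) L dn = some r := by
  intro m
  induction m with
  | zero =>
    intro L dn hC hrk
    have hL : L = [] := by
      cases L with
      | nil => rfl
      | cons v rest =>
        exact absurd (Hbnd v (hC v (by simp))) (by have := hrk v (by simp); omega)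
    subst hL
    exact ⟨dn, by simp [pvARec, pvALevel], pvBLoop_nil da _ dn⟩
  | succ m ih =>
    intro L dn hC hrk
    have hok : ∀ v ∈ L, (da.get? v).isSome = true := fun v hv => (HC v (hC v hv)).1
    have hAlvl := pvALevel_eq da L dn [] hok
    have hC' : ∀ c ∈ pvNxt da L, c ∈ C := by
      intro c hc
      obtain ⟨v, hv, hcv⟩ := List.mem_flatMap.mp hc
      exact ((HC v (hC v hv)).2 c hcv).1
    have hrk' : ∀ c ∈ pvNxt da L, N ≤ m + rank c := by
      intro c hc
      obtain ⟨v, hv, hcv⟩ := List.mem_flatMap.mp hc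
      have h1 := ((HC v (hC v hv)).2 c hcv).2
      have h2 := hrk v hv
      omega
    have hB : pvBLoop da (pvG da (m + 1) L) L dn
        = pvBLoop da (pvG da m (pvNxt da L)) (pvNxt da L) (pvIns da dn L) := by
      have := pvBLoop_split da L [] dn (pvG da (m + 1) L) hok (by simp [pvG])
      simpa [pvG] using this
    by_cases hnxt : pvNxt da L = []
    · refine ⟨pvIns da dn L, ?_, ?_⟩
      · simp [pvARec, hAlvl, hnxt]
      · rw [hB, hnxt, pvBLoop_nil]
    · obtain ⟨r, hAr, hBr⟩ := ih (pvNxt da L) (pvIns da dn L) hC' hrk'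
      refine ⟨r, ?_, ?_⟩
      · simpa [pvARec, hAlvl, hnxt] using hAr
      · rw [hB]; exact hBr

theorem pvNxt_len (da : PySem.Dict String (List String)) (S : Nat)
    (hS : ∀ v, (da.getD v []).length ≤ S) (L : List String) :
    (pvNxt da L).length ≤ L.length * S := by
  induction L with
  | nil => simp [pvNxt]
  | cons v rest ih =>
    have := hS v
    simp only [pvNxt, List.flatMap_cons, List.length_append, List.length_cons] at *
    calc (da.getD v []).length + (rest.flatMap fun v => da.getD v []).length
        ≤ S + rest.length * S := Nat.add_le_add (hS v) ih
      _ = (rest.length + 1) * S := by ring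

theorem pvG_le (da : PySem.Dict String (List String)) (S : Nat)
    (hS : ∀ v, (da.getD v []).length ≤ S) :
    ∀ (m : Nat) (L : List String), pvG da m L ≤ L.length * (m + 1) * (S + 1) ^ m := by
  intro m
  induction m with
  | zero => intro L; simp [pvG]
  | succ m ih =>
    intro L
    have h1 : pvG da m (pvNxt da L) ≤ (pvNxt da L).length * (m + 1) * (S + 1) ^ m := ih _
    have h2 : (pvNxt da L).length ≤ L.length * S := pvNxt_len da S hS L
    have h3 : (pvNxt da L).length * (m + 1) * (S + 1) ^ m
        ≤ L.length * S * (m + 1) * (S + 1) ^ m := by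
      exact Nat.mul_le_mul_right _ (Nat.mul_le_mul_right _ h2)
    have h4 : L.length + L.length * S * (m + 1) * (S + 1) ^ m
        ≤ L.length * (m + 2) * (S + 1) ^ (m + 1) := by
      have hp : 1 ≤ (S + 1) ^ (m + 1) := Nat.one_le_pow _ _ (by omega)
      have hq : S * (S + 1) ^ m ≤ (S + 1) ^ (m + 1) := by
        calc S * (S + 1) ^ m ≤ (S + 1) * (S + 1) ^ m := Nat.mul_le_mul_right _ (by omega)
          _ = (S + 1) ^ (m + 1) := by ring
      calc L.length + L.length * S * (m + 1) * (S + 1) ^ m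
          = L.length * 1 + L.length * (m + 1) * (S * (S + 1) ^ m) := by ring
        _ ≤ L.length * (S + 1) ^ (m + 1) + L.length * (m + 1) * (S + 1) ^ (m + 1) :=
            Nat.add_le_add (Nat.mul_le_mul_left _ hp)
              (Nat.mul_le_mul_left _ hq)
        _ = L.length * (m + 2) * (S + 1) ^ (m + 1) := by ring
    calc pvG da (m + 1) L = L.length + pvG da m (pvNxt da L) := rfl
      _ ≤ L.length + L.length * S * (m + 1) * (S + 1) ^ m := by omega
      _ ≤ L.length * (m + 2) * (S + 1) ^ (m + 1) := h4

theorem pvTop (dict_old : List (String × List String)) (x : String)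
    (lista_livelli : List String) (dizionario_nuovo : List (String × List String))
    (hpre : Pre_cancella_sottoalbero02 dict_old x lista_livelli dizionario_nuovo) :
    cancella_sottoalbero02 dict_old x lista_livelli dizionario_nuovo
      = cancella_sottoalbero02_alt dict_old x lista_livelli dizionario_nuovo := by
  obtain ⟨h1, h2⟩ := hpre
  set da := PySem.Dict.ofList dict_old with hda
  set K := pvK dict_old lista_livelli with hK
  set C := pvReach dict_old lista_livelli with hCdef
  -- universes and the closedness of the various closures
  have hWch : ∀ v, ∀ c ∈ da.getD v [], c ∈ pvAC dict_old := by
    intro v c hc; exact pvChilds_sub_AC dict_old v c hc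
  have hKbig : (pvAC dict_old).length < K := by
    rw [hK]; unfold pvK; omega
  have hCclosed : pvClosed da C := by
    rw [hCdef]
    unfold pvReach
    apply pvClosN_closed da (lista_livelli ++ pvAC dict_old)
      (fun v c hc => List.mem_append.mpr (Or.inr (hWch v c hc)))
      K _ (PySem.Set.nodup_ofList _)
      (fun y hy => List.mem_append.mpr (Or.inl ((PySem.Set.mem_ofList _ _).mp hy)))
    have hle := PySem.Set.length_ofList_le (lista_livelli ++ pvAC dict_old)
    rw [List.length_append] at hle
    rw [hK]; unfold pvK; omega
  have hCnodup : C.Nodup := pvClosN_nodup da K _ (PySem.Set.nodup_ofList _)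
  have hCkeys : ∀ v ∈ C, v ∈ dict_old.map Prod.fst := h1
  have hClen : C.length ≤ dict_old.length := by
    have := (hCnodup.subperm hCkeys).length_le
    simpa using this
  -- the per-node reach set and the rank it defines
  set R : String → List String := fun v => pvClosN da K [v] with hR
  have hRmem : ∀ v, v ∈ R v := fun v => pvClosN_sub da K [v] (by simp)
  have hRnodup : ∀ v, (R v).Nodup := fun v => pvClosN_nodup da K [v] (by simp)
  have hRclosed : ∀ v ∈ C, pvClosed da (R v) := by
    intro v _
    apply pvClosN_closed da (v :: pvAC dict_old)
      (fun u c hc => List.mem_cons.mpr (Or.inr (hWch u c hc)))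
      K [v] (by simp) (by simp)
    have hle := PySem.Set.length_ofList_le (v :: pvAC dict_old)
    simp only [List.length_cons] at hle ⊢
    omega
  have hRsubC : ∀ v ∈ C, R v ⊆ C := by
    intro v hv
    exact pvClosN_sub_closed da C hCclosed K [v] (by simpa using hv)
  have hRlen : ∀ v ∈ C, (R v).length ≤ dict_old.length :=
    fun v hv => le_trans ((hRnodup v).subperm (hRsubC v hv)).length_le hClen
  set N := dict_old.length + 1 with hN
  set rank : String → Nat := fun v => N - (R v).length with hrank
  -- rank strictly increases along edges inside C
  have hEdge : ∀ v ∈ C, ∀ c ∈ da.getD v [], c ∈ C ∧ rank v < rank c := by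
    intro v hv c hc
    have hcC : c ∈ C := hCclosed v hv c hc
    refine ⟨hcC, ?_⟩
    -- R c ⊆ R v
    have hcRv : c ∈ R v := hRclosed v hv v (hRmem v) c hc
    have hRcRv : R c ⊆ R v :=
      pvClosN_sub_closed da (R v) (hRclosed v hv) K [c] (by simpa using hcRv)
    -- v ∉ R c, via the acyclicity condition on the closure of v's children
    have hDclosed : pvClosed da (pvClosN da K (PySem.Set.ofList (da.getD v []))) := by
      apply pvClosN_closed da (pvAC dict_old) hWch K _ (PySem.Set.nodup_ofList _)
        (fun y hy => hWch v y ((PySem.Set.mem_ofList _ _).mp hy))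
      have hle := PySem.Set.length_ofList_le (pvAC dict_old)
      omega
    have hcD : c ∈ pvClosN da K (PySem.Set.ofList (da.getD v [])) :=
      pvClosN_sub da K _ ((PySem.Set.mem_ofList _ _).mpr hc)
    have hRcD : R c ⊆ pvClosN da K (PySem.Set.ofList (da.getD v [])) :=
      pvClosN_sub_closed da _ hDclosed K [c] (by simpa using hcD)
    have hvnotRc : v ∉ R c := fun hmem => (h2 v hv) (hRcD hmem)
    -- so |R c| < |R v|
    have hsub : (R c ++ [v]) ⊆ R v := by
      intro y hy
      rcases List.mem_append.mp hy with hy | hy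
      · exact hRcRv hy
      · rw [List.mem_singleton] at hy
        exact hy ▸ hRmem v
    have hnd : (R c ++ [v]).Nodup := by
      rw [List.nodup_append]
      refine ⟨hRnodup c, List.nodup_singleton v, ?_⟩
      intro a ha b hb
      rw [List.mem_singleton] at hb
      exact hb ▸ fun hav => hvnotRc (hav ▸ ha)
    have hlt := (hnd.subperm hsub).length_le
    simp only [List.length_append, List.length_singleton] at hlt
    have h1v := hRlen v hv
    have hpos : 1 ≤ (R c).length := List.length_pos_iff.mpr
      (fun hnil => by simpa [hnil] using hRmem c)
    simp only [hrank, hN]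
    omega
  have hHbnd : ∀ v ∈ C, rank v < N := by
    intro v hv
    have hpos : 1 ≤ (R v).length := List.length_pos_iff.mpr
      (fun hnil => by simpa [hnil] using hRmem v)
    simp only [hrank, hN]; omega
  have hHC : ∀ v ∈ C, (da.get? v).isSome = true ∧
      ∀ c ∈ da.getD v [], c ∈ C ∧ rank v < rank c :=
    fun v hv => ⟨(pvOk_iff _ _).mpr (hCkeys v hv), hEdge v hv⟩
  -- lista_livelli lies in C with rank ≥ 1, so m = dict_old.length levels suffice
  have hLC : ∀ v ∈ lista_livelli, v ∈ C := by
    intro v hv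
    exact pvClosN_sub da K _ ((PySem.Set.mem_ofList _ _).mpr hv)
  have hLrk : ∀ v ∈ lista_livelli, N ≤ dict_old.length + rank v := by
    intro v hv
    have hle := hRlen v (hLC v hv)
    simp only [hrank, hN]
    omega
  obtain ⟨r, hA, hB⟩ := pvMain da C rank N hHC hHbnd dict_old.length lista_livelli
    (PySem.Dict.ofList dizionario_nuovo) hLC hLrk
  have hS : ∀ v, (da.getD v []).length
      ≤ (dict_old.map (fun p => p.2.length)).foldl max 0 := by
    intro v
    cases hg : da.get? v with
    | none => simp [PySem.Dict.getD, hg]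
    | some w =>
      rcases pvGet?_foldl_mem dict_old PySem.Dict.empty v w hg with hw | hw
      · obtain ⟨p, hp, rfl⟩ := List.mem_map.mp hw
        have hmem : p.2.length ∈ dict_old.map (fun p => p.2.length) :=
          List.mem_map.mpr ⟨p, hp, rfl⟩
        have := (PySem.List.le_foldl_max (dict_old.map (fun p => p.2.length)) 0).2 _ hmem
        simpa [PySem.Dict.getD, hg] using this
      · simp [PySem.Dict.get?_empty] at hw
  have hF : pvG da dict_old.length lista_livelli
      ≤ (lista_livelli.length + 1) * (dict_old.length + 1) *
        ((dict_old.map (fun p => p.2.length)).foldl max 0 + 1) ^ (dict_old.length + 1) := by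
    have hgle := pvG_le da
      ((dict_old.map (fun p => p.2.length)).foldl max 0) hS dict_old.length lista_livelli
    have hstep : lista_livelli.length * (dict_old.length + 1) *
        ((dict_old.map (fun p => p.2.length)).foldl max 0 + 1) ^ dict_old.length
        ≤ (lista_livelli.length + 1) * (dict_old.length + 1) *
        ((dict_old.map (fun p => p.2.length)).foldl max 0 + 1) ^ (dict_old.length + 1) :=
      Nat.mul_le_mul
        (Nat.mul_le_mul_right _ (Nat.le_succ _))
        (Nat.pow_le_pow_right (by omega) (Nat.le_succ _))
    omega
  have hBF : pvBLoop da
      ((lista_livelli.length + 1) * (dict_old.length + 1) *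
        ((dict_old.map (fun p => p.2.length)).foldl max 0 + 1) ^ (dict_old.length + 1))
      lista_livelli (PySem.Dict.ofList dizionario_nuovo) = some r := by
    have := pvBLoop_mono da
      (pvG da dict_old.length lista_livelli)
      ((lista_livelli.length + 1) * (dict_old.length + 1) *
        ((dict_old.map (fun p => p.2.length)).foldl max 0 + 1) ^ (dict_old.length + 1)
        - pvG da dict_old.length lista_livelli)
      lista_livelli (PySem.Dict.ofList dizionario_nuovo) r hB
    rwa [Nat.add_sub_cancel' hF] at this
  unfold cancella_sottoalbero02 cancella_sottoalbero02_alt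
  rw [← hda, hA, hBF]

-- ===== VERDICT (by name: the statement is the Claim_ definition above) =====
theorem cancella_sottoalbero02_spec : Claim_equal_cancella_sottoalbero02 := by
  intro dict_old x ll dn _ hpre
  unfold Spec_cancella_sottoalbero02
  exact pvTop dict_old x ll dn hpre
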